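-- pv_equiv track=rewrite | github.com/RosemarieSchoolAssign/aoc21 | 9dec.py | update_previous_row
-- ===== SOURCE A (Python) =====
-- def update_previous_row(depth, previous_row):
--     connected = False
--     for i in depth:
--         for previous_depth in previous_row:
--             if i in previous_depth and not connected:
--                 previous_depth += depth
--                 connected = True
--     if not connected:
--         previous_row.append(depth)
--     return previous_row
-- ===== SOURCE B (Python) =====
-- def update_previous_row(depth, previous_row):
--     # Index each value's first position in depth once, then take the global
--     # minimum of those positions over all elements of previous_row: that
--     # position pins down the matched element and (via its first containing
--     # group) the merge target, replacing A's nested rescans.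
--     pos = {}
--     for k, i in enumerate(depth):
--         pos.setdefault(i, k)
--     p = min((pos[x] for group in previous_row for x in group if x in pos),
--             default=None)
--     if p is None:
--         previous_row.append(depth)
--     else:
--         i = depth[p]
--         j = next(j for j, group in enumerate(previous_row) if i in group)
--         previous_row[j] += depth
--     return previous_row
-- ===== Notes on version B (the rewrite author's own statement) =====
-- stated objective: faster
-- what changed: Instead of A's nested early-flag scan (depth outer, rows inner), B indexes each value's first position in depth once, takes the global minimum of those positions over all elements of previous_row to identify the matched element, then extends its first containing group.
import Mathlib
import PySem

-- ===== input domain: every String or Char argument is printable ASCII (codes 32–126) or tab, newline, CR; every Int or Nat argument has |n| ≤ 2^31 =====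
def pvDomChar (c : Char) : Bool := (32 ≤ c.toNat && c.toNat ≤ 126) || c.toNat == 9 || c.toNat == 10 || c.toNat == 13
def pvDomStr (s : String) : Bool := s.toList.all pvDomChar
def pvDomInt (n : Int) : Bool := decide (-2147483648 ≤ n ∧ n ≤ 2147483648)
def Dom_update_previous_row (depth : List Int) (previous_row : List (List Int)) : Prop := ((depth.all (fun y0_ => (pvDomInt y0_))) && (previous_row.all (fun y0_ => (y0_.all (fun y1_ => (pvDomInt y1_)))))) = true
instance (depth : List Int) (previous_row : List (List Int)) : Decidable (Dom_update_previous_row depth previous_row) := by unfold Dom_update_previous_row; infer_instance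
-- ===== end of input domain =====

-- B replaces A's nested early-flag scan by a one-pass first-position index of depth plus a
-- global minimum over the elements of previous_row (faster).
-- Both Pythons mutate previous_row in place; the equivalence proved here is about the return value.


-- ===== PORT A =====
-- inner 'for previous_depth in previous_row' loop: state = (rows so far, connected)
def innerA (i : Int) (dep : List Int) : List (List Int) → Bool → List (List Int) × Bool
  | [], c => ([], c)
  | g :: gs, c =>
    if i ∈ g ∧ c = false then
      let r := innerA i dep gs true
      ((g ++ dep) :: r.1, r.2)
    else
      let r := innerA i dep gs c
      (g :: r.1, r.2)

-- outer 'for i in depth' loop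
def outerA (dep : List Int) : List Int → List (List Int) → Bool → List (List Int) × Bool
  | [], rows, c => (rows, c)
  | i :: rest, rows, c =>
    let r := innerA i dep rows c
    outerA dep rest r.1 r.2

def update_previous_row (depth : List Int) (previous_row : List (List Int)) : List (List Int) :=
  let st := outerA depth depth previous_row false
  if st.2 = false then st.1 ++ [depth] else st.1

-- ===== PORT B =====
-- 'for k, i in enumerate(depth): pos.setdefault(i, k)' (enumerate indices are Nats — exact)
def buildPosB : List Int → Nat → PySem.Dict Int Nat → PySem.Dict Int Nat
  | [], _, d => d
  | i :: rest, k, d =>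
      buildPosB rest (k + 1) (if (PySem.Dict.get? d i).isSome then d else PySem.Dict.insert d i k)

def update_previous_row_alt (depth : List Int) (previous_row : List (List Int)) : List (List Int) :=
  let pos := buildPosB depth 0 PySem.Dict.empty
  -- p = min((pos[x] for group in previous_row for x in group if x in pos), default=None)
  let p? := ((previous_row.flatMap (fun group => group)).filterMap
               (fun x => PySem.Dict.get? pos x)).min?
  match p? with
  | none => previous_row ++ [depth]
  | some p =>
    -- i = depth[p]  (p is a position inside depth, so the .getD 0 totalisation never fires)
    let i := (PySem.List.pyGet? depth (p : Int)).getD 0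
    -- j = next(j for j, group in enumerate(previous_row) if i in group)
    -- (a matching group exists, so the .getD 0 totalisation never fires)
    let j := (previous_row.findIdx? (fun g => decide (i ∈ g))).getD 0
    previous_row.set j (((previous_row[j]?).getD []) ++ depth)

-- ===== PRECONDITION & SPEC =====
def Spec_update_previous_row (depth : List Int) (previous_row : List (List Int)) (out : List (List Int)) : Prop := out = update_previous_row_alt depth previous_row
instance (depth : List Int) (previous_row : List (List Int)) (out : List (List Int)) : Decidable (Spec_update_previous_row depth previous_row out) := by unfold Spec_update_previous_row; infer_instance

-- ===== CLAIM (what is proved, stated in full; the proofs are below) =====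
def Claim_equal_update_previous_row : Prop := ∀ (depth : List Int) (previous_row : List (List Int)), Dom_update_previous_row depth previous_row → Spec_update_previous_row depth previous_row (update_previous_row depth previous_row)

-- ===== LEMMAS AND PROOFS =====

theorem innerA_true (i : Int) (dep : List Int) : ∀ rows : List (List Int), innerA i dep rows true = (rows, true) := by
  intro rows
  induction rows with
  | nil => rfl
  | cons g gs ih => simp [innerA, ih]

theorem outerA_true (dep : List Int) : ∀ (l : List Int) (rows : List (List Int)), outerA dep l rows true = (rows, true) := by
  intro l
  induction l with
  | nil => intro rows; rfl
  | cons i rest ih => intro rows; simp [outerA, innerA_true, ih]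

-- characterisation of the inner loop started with connected = false
theorem innerA_false (i : Int) (dep : List Int) : ∀ rows : List (List Int),
    innerA i dep rows false =
      match rows.findIdx? (fun g => decide (i ∈ g)) with
      | none => (rows, false)
      | some j => (rows.set j (((rows[j]?).getD []) ++ dep), true) := by
  intro rows
  induction rows with
  | nil => rfl
  | cons g gs ih =>
    by_cases h : i ∈ g
    · simp [innerA, h, innerA_true, List.findIdx?_cons]
    · simp only [innerA, h, false_and, if_false, List.findIdx?_cons, decide_eq_true_eq, ih]
      cases hfi : gs.findIdx? (fun g => decide (i ∈ g)) with
      | none => simp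
      | some j => simp [List.set]

-- A = scan depth for the first i contained in some row, then extend that row
theorem A_scan (dep : List Int) (rows : List (List Int)) : ∀ l : List Int,
    (let st := outerA dep l rows false
     if st.2 = false then st.1 ++ [dep] else st.1) =
      match l.find? (fun i => (rows.findIdx? (fun g => decide (i ∈ g))).isSome) with
      | none => rows ++ [dep]
      | some i =>
        let j := (rows.findIdx? (fun g => decide (i ∈ g))).getD 0
        rows.set j (((rows[j]?).getD []) ++ dep) := by
  intro l
  induction l with
  | nil => simp [outerA]
  | cons i rest ih =>
    simp only [outerA, innerA_false, List.find?_cons]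
    cases hfi : rows.findIdx? (fun g => decide (i ∈ g)) with
    | none => simpa [hfi] using ih
    | some j => simp [hfi, outerA_true]

-- the position dict maps x to the first index of x in depth (offset by the start index)
theorem buildPosB_get (x : Int) : ∀ (l : List Int) (k : Nat) (d : PySem.Dict Int Nat),
    PySem.Dict.get? (buildPosB l k d) x =
      match PySem.Dict.get? d x with
      | some v => some v
      | none => (l.findIdx? (fun y => decide (y = x))).map (· + k) := by
  intro l
  induction l with
  | nil => intro k d; cases h : PySem.Dict.get? d x <;> simp [buildPosB, h]
  | cons i rest ih =>
    intro k d
    simp only [buildPosB, ih]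
    by_cases hi : (PySem.Dict.get? d i).isSome
    · rw [if_pos hi]
      cases h : PySem.Dict.get? d x with
      | some v => simp
      | none =>
        have hix : ¬ (i = x) := by
          intro he; rw [he, h] at hi; simp at hi
        simp only [List.findIdx?_cons, decide_eq_true_eq, if_neg hix]
        cases hfi : rest.findIdx? (fun y => decide (y = x)) with
        | none => simp
        | some v => simp; omega
    · rw [if_neg hi]
      by_cases hix : i = x
      · subst hix
        have h : PySem.Dict.get? d i = none := by
          cases h : PySem.Dict.get? d i
          · rfl
          · rw [h] at hi; simp at hi
        simp [h, PySem.Dict.get?_insert_self, List.findIdx?_cons]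
      · rw [PySem.Dict.get?_insert_of_ne _ _ (fun he => hix he.symm)]
        cases h : PySem.Dict.get? d x with
        | some v => simp
        | none =>
          simp only [List.findIdx?_cons, decide_eq_true_eq, if_neg hix]
          cases hfi : rest.findIdx? (fun y => decide (y = x)) with
          | none => simp
          | some v => simp; omega

theorem buildPosB_top (x : Int) (dep : List Int) :
    PySem.Dict.get? (buildPosB dep 0 PySem.Dict.empty) x =
      dep.findIdx? (fun y => decide (y = x)) := by
  rw [buildPosB_get]
  simp [PySem.Dict.get?_empty]

-- the global minimum of first positions is the index of the first depth element in flat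
theorem min_filterMap_idx (dep flat : List Int) :
    (flat.filterMap (fun x => dep.findIdx? (fun y => decide (y = x)))).min? =
      dep.findIdx? (fun i => decide (i ∈ flat)) := by
  cases h : dep.findIdx? (fun i => decide (i ∈ flat)) with
  | none =>
    rw [List.findIdx?_eq_none_iff] at h
    rw [List.min?_eq_none_iff, List.filterMap_eq_nil_iff]
    intro x hx
    rw [List.findIdx?_eq_none_iff]
    intro y hy
    have hnf := h y hy
    simp only [decide_eq_false_iff_not] at hnf ⊢
    intro he; exact hnf (he ▸ hx)
  | some k =>
    rw [List.findIdx?_eq_some_iff_getElem] at h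
    obtain ⟨hk, hmem, hmin⟩ := h
    simp only [decide_eq_true_eq] at hmem hmin
    rw [List.min?_eq_some_iff]
    constructor
    · rw [List.mem_filterMap]
      refine ⟨dep[k], hmem, ?_⟩
      rw [List.findIdx?_eq_some_iff_getElem]
      refine ⟨hk, by simp, ?_⟩
      intro j hj
      rw [decide_eq_true_eq]
      intro he
      exact hmin j hj (by rw [he]; exact hmem)
    · intro v hv
      rw [List.mem_filterMap] at hv
      obtain ⟨x, hx, hfi⟩ := hv
      rw [List.findIdx?_eq_some_iff_getElem] at hfi
      obtain ⟨hv, hxv, _⟩ := hfi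
      simp only [decide_eq_true_eq] at hxv
      by_contra hlt
      exact hmin v (by omega) (hxv ▸ hx)

-- the B-side membership predicate over the flattened rows equals A-side "some row contains i"
theorem pred_eq (rows : List (List Int)) (i : Int) :
    (rows.findIdx? (fun g => decide (i ∈ g))).isSome = decide (i ∈ rows.flatMap (fun g => g)) := by
  rw [List.findIdx?_isSome]
  by_cases h : i ∈ rows.flatMap (fun g => g)
  · rw [decide_eq_true h, List.any_eq_true]
    rcases List.mem_flatMap.mp h with ⟨g, hg, hig⟩
    exact ⟨g, hg, decide_eq_true hig⟩
  · rw [decide_eq_false h, List.any_eq_false]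
    intro g hg
    rw [decide_eq_true_eq]
    exact fun hig => h (List.mem_flatMap.mpr ⟨g, hg, hig⟩)

-- find? returns the element at the index found by findIdx?
theorem find?_of_findIdx? {p : Int → Bool} {l : List Int} {k : Nat} (h : l.findIdx? p = some k) :
    ∃ hk : k < l.length, l.find? p = some l[k] := by
  rw [List.findIdx?_eq_some_iff_getElem] at h
  obtain ⟨hk, hp, hmin⟩ := h
  refine ⟨hk, ?_⟩
  rw [List.find?_eq_some_iff_getElem]
  exact ⟨hp, k, hk, rfl, fun j hj => by simpa using hmin j hj⟩

-- ===== VERDICT (by name: the statement is the Claim_ definition above) =====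
theorem update_previous_row_spec : Claim_equal_update_previous_row := by
  intro depth rows _
  unfold Spec_update_previous_row update_previous_row update_previous_row_alt
  have hpos : (fun x => PySem.Dict.get? (buildPosB depth 0 PySem.Dict.empty) x) =
      (fun x => depth.findIdx? (fun y => decide (y = x))) :=
    funext (fun x => buildPosB_top x depth)
  rw [A_scan depth rows depth]
  simp only [hpos, min_filterMap_idx]
  have hp : (fun i => (rows.findIdx? (fun g => decide (i ∈ g))).isSome) =
      (fun i => decide (i ∈ rows.flatMap (fun g => g))) :=
    funext (pred_eq rows)
  rw [hp]
  cases hfi : depth.findIdx? (fun i => decide (i ∈ rows.flatMap (fun g => g))) with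
  | none =>
    have hfn : depth.find? (fun i => decide (i ∈ rows.flatMap (fun g => g))) = none := by
      rw [List.find?_eq_none]
      rw [List.findIdx?_eq_none_iff] at hfi
      simpa using hfi
    rw [hfn]
  | some k =>
    obtain ⟨hk, hfind⟩ := find?_of_findIdx? hfi
    rw [hfind]
    simp only [PySem.List.pyGet?_natCast, List.getElem?_eq_getElem hk, Option.getD_some]
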